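-- pv_equiv track=rewrite | github.com/Arsalan-sufi/Numpy | python_dsa/Rev_array_Recursion.py | reverseSubArray
-- ===== SOURCE A (Python) =====
-- def reverseSubArray(arr, l, r):
--     # Convert to 0-based indexing
--     l -= 1
--     r -= 1
--
--     while l < r:
--         arr[l], arr[r] = arr[r], arr[l]
--         l += 1
--         r -= 1
--
--     return arr
-- ===== SOURCE B (Python) =====
-- def reverseSubArray(arr, l, r):
--     # Clamp the 1-based bounds into the array, then splice a reversed copy
--     # of that subarray back over it: no element-by-element swapping.
--     lo = max(l - 1, 0)
--     hi = min(max(r, 0), len(arr))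
--     arr[lo:hi] = arr[lo:hi][::-1]
--     return arr
-- ===== Notes on version B (the rewrite author's own statement) =====
-- stated objective: idiomatic
-- what changed: Replaces A's in-place two-pointer swap loop with one Python slice assignment that splices a reversed copy of the clamped 1-based subarray back in, the way an experienced Python developer reverses a sublist.
-- intended difference: On calls whose loop starts out of range (l < r with l <= 0) A's negative-index wraparound swaps elements across the end of the list and returns a scrambled list, while B clamps the 1-based bounds into the array and reverses exactly the in-range part of the requested subarray, which is the intended reading of such bounds. — e.g. on reverseSubArray([1, 2, 3], 0, 2): A returns [1, 3, 2], B returns [2, 1, 3]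
import Mathlib
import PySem

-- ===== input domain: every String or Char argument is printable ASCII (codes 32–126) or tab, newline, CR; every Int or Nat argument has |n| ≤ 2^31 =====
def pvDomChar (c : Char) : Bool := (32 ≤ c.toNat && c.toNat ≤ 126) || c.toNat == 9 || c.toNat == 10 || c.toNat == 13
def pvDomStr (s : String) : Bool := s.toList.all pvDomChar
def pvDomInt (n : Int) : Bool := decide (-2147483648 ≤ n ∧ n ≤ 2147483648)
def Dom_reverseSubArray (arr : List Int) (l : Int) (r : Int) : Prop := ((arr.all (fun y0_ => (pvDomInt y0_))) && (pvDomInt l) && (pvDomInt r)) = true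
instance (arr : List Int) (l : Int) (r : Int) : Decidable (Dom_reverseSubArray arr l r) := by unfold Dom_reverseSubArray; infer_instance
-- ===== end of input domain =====

-- B replaces A's in-place two-pointer swap loop by a single slice assignment that splices a
-- reversed copy of the clamped 1-based subarray back in (equality of the RETURN value is what is
-- proved; both Pythons mutate the argument list in place).

-- ===== PORT A =====
-- the while loop: state (arr, l, r), one iteration swaps arr[l] and arr[r]
-- (both reads before both writes, left write first, as in the Python tuple assignment);
-- pyGetD/pySetD are exact here because Pre_ puts every accessed index in range.
def pvWhileA (arr : List Int) (l : Int) (r : Int) : List Int :=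
  if h : l < r then
    let tmpR := PySem.List.pyGetD arr r 0
    let tmpL := PySem.List.pyGetD arr l 0
    pvWhileA (PySem.List.pySetD (PySem.List.pySetD arr l tmpR) r tmpL) (l + 1) (r - 1)
  else arr
termination_by (r - l).toNat
decreasing_by omega

def reverseSubArray (arr : List Int) (l : Int) (r : Int) : List Int :=
  pvWhileA arr (l - 1) (r - 1)

-- ===== PORT B =====
-- hand port of Source B: lo = max(l-1, 0), hi = min(max(r, 0), len(arr)); the slice assignment
-- arr[lo:hi] = arr[lo:hi][::-1] is CPython's arr[:lo'] ++ X ++ arr[max(lo',hi'):] with the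
-- resolved bounds (here already clamped to 0..len, so take/drop are exact).
def reverseSubArray_alt (arr : List Int) (l : Int) (r : Int) : List Int :=
  let lo := max (l - 1) 0
  let hi := min (max r 0) (arr.length : Int)
  arr.take lo.toNat ++ (PySem.List.slice arr (some lo) (some hi)).reverse ++
    arr.drop (max lo hi).toNat

-- ===== PRECONDITION & SPEC =====
-- Pre_ excludes exactly the inputs where A raises IndexError: if the loop runs (l < r), the
-- first iteration touches indices l-1 and r-1 and every later index lies between them, so A
-- returns iff those bounds are legal Python indices (negative-wrap included).
def Pre_reverseSubArray (arr : List Int) (l : Int) (r : Int) : Prop :=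
  l < r → (-(arr.length : Int) ≤ l - 1 ∧ r - 1 < (arr.length : Int))
instance (arr : List Int) (l : Int) (r : Int) : Decidable (Pre_reverseSubArray arr l r) := by
  unfold Pre_reverseSubArray; infer_instance

def pvWitness_reverseSubArray : List Int × Int × Int := ([1, 2, 3, 4, 5], 2, 4)

-- On calls whose loop starts out of range (l < r with l ≤ 0) A's negative-index wraparound
-- swaps elements across the end of the list and returns a scrambled list, while B clamps the
-- 1-based bounds into the array and reverses exactly the in-range part of the requested
-- subarray, which is the intended reading of such bounds.
def D_reverseSubArray (arr : List Int) (l : Int) (r : Int) : Prop :=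
  l < r ∧ l ≤ 0
instance (arr : List Int) (l : Int) (r : Int) : Decidable (D_reverseSubArray arr l r) := by
  unfold D_reverseSubArray; infer_instance

def Spec_reverseSubArray (arr : List Int) (l : Int) (r : Int) (out : List Int) : Prop := ¬ D_reverseSubArray arr l r → out = reverseSubArray_alt arr l r
instance (arr : List Int) (l : Int) (r : Int) (out : List Int) : Decidable (Spec_reverseSubArray arr l r out) := by unfold Spec_reverseSubArray; infer_instance

def pvDiffWitness_reverseSubArray : List Int × Int × Int := ([1, 2, 3], 0, 2)
def pvDiffWitnessOut_reverseSubArray : (List Int) × (List Int) := ([1, 3, 2], [2, 1, 3])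

-- ===== CLAIM (what is proved, stated in full; the proofs are below) =====
def Claim_unchanged_reverseSubArray : Prop := ∀ (arr : List Int) (l : Int) (r : Int), Dom_reverseSubArray arr l r → Pre_reverseSubArray arr l r → Spec_reverseSubArray arr l r (reverseSubArray arr l r)
def Claim_changed_reverseSubArray : Prop := Dom_reverseSubArray (pvDiffWitness_reverseSubArray.1) (pvDiffWitness_reverseSubArray.2.1) (pvDiffWitness_reverseSubArray.2.2) ∧ Pre_reverseSubArray (pvDiffWitness_reverseSubArray.1) (pvDiffWitness_reverseSubArray.2.1) (pvDiffWitness_reverseSubArray.2.2) ∧ D_reverseSubArray (pvDiffWitness_reverseSubArray.1) (pvDiffWitness_reverseSubArray.2.1) (pvDiffWitness_reverseSubArray.2.2) ∧ reverseSubArray (pvDiffWitness_reverseSubArray.1) (pvDiffWitness_reverseSubArray.2.1) (pvDiffWitness_reverseSubArray.2.2) = pvDiffWitnessOut_reverseSubArray.1 ∧ reverseSubArray_alt (pvDiffWitness_reverseSubArray.1) (pvDiffWitness_reverseSubArray.2.1) (pvDiffWitness_reverseSubArray.2.2) = pvDiffWitnessOut_reverseSubArray.2 ∧ pvDiffWitnessOut_reverseSubArray.1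 ≠ pvDiffWitnessOut_reverseSubArray.2
-- ===== LEMMAS AND PROOFS =====

-- a slice with nonnegative bounds as take-then-drop
theorem slice_nonneg_take_drop (xs : List Int) (a b : Int) (h1 : 0 ≤ a) (h2 : 0 ≤ b) :
    PySem.List.slice xs (some a) (some b) = (xs.take b.toNat).drop a.toNat := by
  rw [PySem.List.slice_toNat xs h1 h2, List.drop_take]

theorem getD_set_int (xs : List Int) (k : Nat) (v : Int) (j : Nat) :
    (xs.set k v).getD j 0 = if j = k ∧ k < xs.length then v else xs.getD j 0 := by
  simp only [List.getD_eq_getElem?_getD, List.getElem?_set]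
  split_ifs <;>
    first
      | rfl
      | omega
      | (rw [List.getElem?_eq_none (by omega : xs.length ≤ j)]; try rfl)

-- one swap of the loop body, element by element
theorem swap_getD (arr : List Int) (x y : Int) (hx : 0 ≤ x) (hxy : x < y)
    (hy : y < (arr.length : Int)) (j : Nat) :
    (PySem.List.pySetD (PySem.List.pySetD arr x (PySem.List.pyGetD arr y 0)) y
        (PySem.List.pyGetD arr x 0)).getD j 0 =
      if (j : Int) = y then arr.getD x.toNat 0
      else if (j : Int) = x then arr.getD y.toNat 0
      else arr.getD j 0 := by
  rw [PySem.List.pySetD_of_nonneg _ _ hx, PySem.List.pySetD_of_nonneg _ _ (by omega : (0:Int) ≤ y)]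
  rw [PySem.List.pyGetD_eq_getElem _ _ hx (by omega),
      PySem.List.pyGetD_eq_getElem _ _ (by omega : (0:Int) ≤ y) hy]
  rw [getD_set_int, getD_set_int]
  have e1 : arr[y.toNat] = arr.getD y.toNat 0 := (List.getD_eq_getElem _ _ (by omega)).symm
  have e2 : arr[x.toNat] = arr.getD x.toNat 0 := (List.getD_eq_getElem _ _ (by omega)).symm
  rw [e1, e2]
  have hl2 : (arr.set x.toNat (arr.getD y.toNat 0)).length = arr.length := by simp
  simp only [hl2]
  split_ifs <;> first | rfl | omega

theorem swap_length (arr : List Int) (x y : Int) :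
    (PySem.List.pySetD (PySem.List.pySetD arr x (PySem.List.pyGetD arr y 0)) y
        (PySem.List.pyGetD arr x 0)).length = arr.length := by
  simp [PySem.List.length_pySetD]

theorem pvWhileA_length (arr : List Int) (x y : Int) :
    (pvWhileA arr x y).length = arr.length := by
  fun_induction pvWhileA arr x y with
  | case1 arr x y h tmpR tmpL ih => rw [ih]; simp [PySem.List.length_pySetD]
  | case2 arr x y h => rfl

-- the loop on an in-range nonnegative window, element by element
theorem pvWhileA_getD (arr : List Int) (x y : Int) :
    0 ≤ x → y < (arr.length : Int) → ∀ i : Nat,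
      (pvWhileA arr x y).getD i 0 =
        if x ≤ (i : Int) ∧ (i : Int) ≤ y then arr.getD (x + y - i).toNat 0 else arr.getD i 0 := by
  fun_induction pvWhileA arr x y with
  | case1 arr x y h tmpR tmpL ih =>
    intro hx hy i
    have hlen := swap_length arr x y
    have hih := ih (by omega) (by rw [hlen]; omega) i
    rw [hih]
    have hs := fun j => swap_getD arr x y hx h hy j
    by_cases hc1 : x + 1 ≤ (i : Int) ∧ (i : Int) ≤ y - 1
    · rw [if_pos hc1, if_pos (by omega : x ≤ (i:Int) ∧ (i:Int) ≤ y)]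
      rw [hs ((x + 1 + (y - 1) - i).toNat)]
      rw [if_neg (by omega), if_neg (by omega)]
      congr 1; omega
    · rw [if_neg hc1, hs i]
      by_cases hc2 : x ≤ (i : Int) ∧ (i : Int) ≤ y
      · rw [if_pos hc2]
        rcases eq_or_ne (i : Int) y with hiy | hiy
        · rw [if_pos hiy]; congr 1; omega
        · rw [if_neg hiy, if_pos (by omega : (i:Int) = x)]; congr 1; omega
      · rw [if_neg hc2, if_neg (by omega), if_neg (by omega)]
  | case2 arr x y h =>
    intro hx hy i
    by_cases hc : x ≤ (i : Int) ∧ (i : Int) ≤ y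
    · rw [if_pos hc]; congr 1; omega
    · rw [if_neg hc]

-- the spliced reversed segment, element by element
theorem revSeg_getD (arr : List Int) (a b : Nat) (hab : a ≤ b) (hb : b ≤ arr.length) (i : Nat) :
    (arr.take a ++ ((arr.take b).drop a).reverse ++ arr.drop b).getD i 0 =
      if a ≤ i ∧ i < b then arr.getD (a + b - 1 - i) 0 else arr.getD i 0 := by
  have ha : a ≤ arr.length := le_trans hab hb
  have hlt : (arr.take a).length = a := by simp; omega
  have hdt : ((arr.take b).drop a).length = b - a := by simp; omega
  have hlm : (((arr.take b).drop a).reverse).length = b - a := by simp; omega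
  simp only [List.getD_eq_getElem?_getD]
  rcases lt_or_ge i a with h1 | h1
  · rw [if_neg (by omega)]
    rw [List.getElem?_append_left (by simp; omega),
        List.getElem?_append_left (by omega : i < (arr.take a).length)]
    rw [List.getElem?_take_of_lt h1]
  · rcases lt_or_ge i b with h2 | h2
    · rw [if_pos ⟨h1, h2⟩]
      rw [List.append_assoc, List.getElem?_append_right (by omega : (arr.take a).length ≤ i)]
      rw [List.getElem?_append_left (by omega)]
      rw [List.getElem?_reverse (by omega)]
      rw [List.getElem?_drop, List.getElem?_take_of_lt (by omega)]
      congr 2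
      omega
    · rw [if_neg (by omega)]
      rw [List.append_assoc, List.getElem?_append_right (by omega : (arr.take a).length ≤ i),
          List.getElem?_append_right (by omega)]
      rw [List.getElem?_drop]
      congr 2
      omega

theorem revSeg_length (arr : List Int) (a b : Nat) (hab : a ≤ b) (hb : b ≤ arr.length) :
    (arr.take a ++ ((arr.take b).drop a).reverse ++ arr.drop b).length = arr.length := by
  simp; omega

-- the loop from a to b-1 IS the spliced reversed segment [a, b)
theorem pvWhileA_key (arr : List Int) (a b : Nat) (hab : a ≤ b) (hb : b ≤ arr.length) :
    pvWhileA arr (a : Int) ((b : Int) - 1) =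
      arr.take a ++ ((arr.take b).drop a).reverse ++ arr.drop b := by
  apply List.ext_getElem
  · rw [pvWhileA_length, revSeg_length arr a b hab hb]
  · intro i h1 h2
    have hg := pvWhileA_getD arr (a : Int) ((b : Int) - 1) (by omega) (by omega) i
    have hr := revSeg_getD arr a b hab hb i
    rw [pvWhileA_length] at h1
    have e1 : (pvWhileA arr (a : Int) ((b : Int) - 1))[i] =
        (pvWhileA arr (a : Int) ((b : Int) - 1)).getD i 0 :=
      (List.getD_eq_getElem _ _ (by rw [pvWhileA_length]; exact h1)).symm
    have e2 : (arr.take a ++ ((arr.take b).drop a).reverse ++ arr.drop b)[i] =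
        (arr.take a ++ ((arr.take b).drop a).reverse ++ arr.drop b).getD i 0 :=
      (List.getD_eq_getElem _ _ (by rw [revSeg_length arr a b hab hb]; exact h1)).symm
    rw [e1, e2, hg, hr]
    by_cases hc : a ≤ i ∧ i < b
    · rw [if_pos (by omega : (a : Int) ≤ (i : Int) ∧ (i : Int) ≤ (b : Int) - 1), if_pos hc]
      congr 1; omega
    · rw [if_neg (by omega : ¬ ((a : Int) ≤ (i : Int) ∧ (i : Int) ≤ (b : Int) - 1)), if_neg hc]

-- ===== VERDICT (by name: the statement is the Claim_ definition above) =====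
theorem reverseSubArray_spec : Claim_unchanged_reverseSubArray := by
  intro arr l r _ hpre
  unfold Spec_reverseSubArray
  intro hnd
  unfold reverseSubArray reverseSubArray_alt
  show pvWhileA arr (l - 1) (r - 1) =
    arr.take (max (l - 1) 0).toNat ++
      (PySem.List.slice arr (some (max (l - 1) 0))
          (some (min (max r 0) (arr.length : Int)))).reverse ++
      arr.drop (max (max (l - 1) 0) (min (max r 0) (arr.length : Int))).toNat
  set lo := max (l - 1) 0 with hlo
  set hi := min (max r 0) (arr.length : Int) with hhi
  have hlo0 : (0 : Int) ≤ lo := by omega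
  have hhi0 : (0 : Int) ≤ hi := by omega
  rw [slice_nonneg_take_drop arr lo hi hlo0 hhi0]
  set a := lo.toNat with hadef
  set b := hi.toNat with hbdef
  have ha : (a : Int) = lo := by omega
  have hb : (b : Int) = hi := by omega
  have hbn : b ≤ arr.length := by omega
  by_cases hlr : l < r
  · obtain ⟨hp1, hp2⟩ := hpre hlr
    have hl1 : 1 ≤ l := by
      have : ¬ l ≤ 0 := fun hc => hnd ⟨hlr, hc⟩
      omega
    have hloe : lo = l - 1 := by omega
    have hhie : hi = r := by omega
    rw [(by omega : max lo hi = hi), ← hbdef]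
    rw [(by omega : l - 1 = (a : Int)), (by omega : r - 1 = (b : Int) - 1)]
    exact pvWhileA_key arr a b (by omega) hbn
  · rw [pvWhileA, dif_neg (by omega : ¬ (l - 1 < r - 1))]
    have hba : b ≤ a + 1 := by omega
    rcases lt_or_ge a b with hab | hab
    · have hkey := pvWhileA_key arr a b (by omega) hbn
      rw [pvWhileA, dif_neg (by omega : ¬ ((a : Int) < (b : Int) - 1))] at hkey
      rw [(by omega : max lo hi = hi), ← hbdef]
      exact hkey
    · have hmid : (arr.take b).drop a = [] :=
        List.drop_eq_nil_of_le (by rw [List.length_take]; omega)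
      rw [hmid, (by omega : max lo hi = lo), ← hadef]
      simp

theorem reverseSubArray_changed : Claim_changed_reverseSubArray := by
  unfold Claim_changed_reverseSubArray
  refine ⟨by decide, by decide, by decide, ?_, by decide, by decide⟩
  show reverseSubArray [1, 2, 3] 0 2 = [1, 3, 2]
  unfold reverseSubArray
  rw [pvWhileA]
  norm_num
  rw [pvWhileA]
  norm_num [PySem.List.pySetD, PySem.List.pySet?, PySem.List.pyIdx?,
    PySem.List.pyGetD, PySem.List.pyGet?]
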